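-- pv_equiv track=rewrite | github.com/phuctran2703/chess-game | src/core/Board/magic.py | compute_rook_attacks
-- ===== SOURCE A (Python) =====
-- def compute_rook_attacks(square, blockers):
--     """Compute rook attacks with blockers"""
--     attacks = 0
--     rank, file = square // 8, square % 8
--
--     # North
--     for r in range(rank + 1, 8):
--         bit = 1 << (r * 8 + file)
--         attacks |= bit
--         if blockers & bit:
--             break
--
--     # South
--     for r in range(rank - 1, -1, -1):
--         bit = 1 << (r * 8 + file)
--         attacks |= bit
--         if blockers & bit:
--             break
--
--     # East
--     for f in range(file + 1, 8):
--         bit = 1 << (rank * 8 + f)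
--         attacks |= bit
--         if blockers & bit:
--             break
--
--     # West
--     for f in range(file - 1, -1, -1):
--         bit = 1 << (rank * 8 + f)
--         attacks |= bit
--         if blockers & bit:
--             break
--
--     return attacks
-- ===== SOURCE B (Python) =====
-- def _toward_low(ray, blocked):
--     # nearest blocker on an upward ray is its lowest set bit;
--     # blocked ^ (blocked - 1) is the mask of bits up to and including it (all bits when blocked == 0)
--     return ray & (blocked ^ (blocked - 1))
--
--
-- def _toward_high(ray, blocked):
--     # nearest blocker on a downward ray is its highest set bit;
--     # -1 << (its index) is the mask of bits from it upward (all bits when blocked == 0)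
--     return ray & (-1 << max(blocked.bit_length() - 1, 0))
--
--
-- def compute_rook_attacks(square, blockers):
--     """Compute rook attacks with blockers"""
--     file = square % 8
--     col = 0x0101010101010101 << file      # the rook's file
--     row = 0xFF << (square - file)         # the rook's rank
--     above = -(1 << (square + 1))          # bits strictly above square
--     below = (1 << square) - 1             # bits strictly below square
--     north, east = col & above, row & above
--     south, west = col & below, row & below
--     return (_toward_low(north, blockers & north)
--             | _toward_low(east, blockers & east)
--             | _toward_high(south, blockers & south)
--             | _toward_high(west, blockers & west))
-- ===== Notes on version B (the rewrite author's own statement) =====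
-- stated objective: alternative
-- what changed: A walks each of the four directions square by square with a break at the first blocker; B builds the four ray bitboards in closed form (column/row masks cut by above/below-square masks) and trims each ray with a single bit-scan trick (blocked ^ (blocked - 1) for the lowest blocker bit, -1 << (bit_length - 1) for the highest), with no per-square loop.
-- outside the precondition, e.g. on compute_rook_attacks(72, 1): A returns 1199499605733136431907073, B returns 1199481158989062722355457; on compute_rook_attacks(-3, 0): A raises ValueError, B raises ValueError
import Mathlib
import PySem

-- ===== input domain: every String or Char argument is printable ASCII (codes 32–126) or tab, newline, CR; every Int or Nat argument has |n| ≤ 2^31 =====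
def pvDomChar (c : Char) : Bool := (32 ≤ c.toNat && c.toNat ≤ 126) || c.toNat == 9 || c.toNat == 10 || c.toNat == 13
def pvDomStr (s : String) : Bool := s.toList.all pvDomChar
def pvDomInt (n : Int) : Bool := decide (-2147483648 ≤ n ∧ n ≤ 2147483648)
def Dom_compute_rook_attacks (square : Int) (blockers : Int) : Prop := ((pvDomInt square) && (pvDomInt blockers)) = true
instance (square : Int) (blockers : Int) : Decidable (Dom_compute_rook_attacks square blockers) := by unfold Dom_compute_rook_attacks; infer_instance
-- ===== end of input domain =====

-- B replaces A's four stepwise walk-until-blocker loops by closed-form ray masks and one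
-- bit-scan per direction (alternative algorithm, same exact values on the 64 board squares).

-- ===== PORT A =====
-- Shared body of A's four direction `for` loops: walk the listed bit positions,
-- OR each bit into `attacks`, break after the first blocker.
-- Python's `1 << e` is `1 <<< e.toNat`: exact for e ≥ 0, which Pre_ guarantees.
def pvLoopA (blockers : Int) (ps : List Int) (attacks : Int) : Int :=
  match ps with
  | [] => attacks
  | p :: rest =>
    let bit : Int := 1 <<< p.toNat
    let attacks' := PySem.Int.bor attacks bit
    if PySem.Int.band blockers bit ≠ 0 then attacks' else pvLoopA blockers rest attacks'

def compute_rook_attacks (square : Int) (blockers : Int) : Int :=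
  let rank := PySem.Int.floordiv square 8
  let file := PySem.Int.mod square 8
  let a1 := pvLoopA blockers ((PySem.List.pyRange (rank + 1) 8 1).map (fun r => r * 8 + file)) 0
  let a2 := pvLoopA blockers ((PySem.List.pyRange (rank - 1) (-1) (-1)).map (fun r => r * 8 + file)) a1
  let a3 := pvLoopA blockers ((PySem.List.pyRange (file + 1) 8 1).map (fun f => rank * 8 + f)) a2
  pvLoopA blockers ((PySem.List.pyRange (file - 1) (-1) (-1)).map (fun f => rank * 8 + f)) a3

-- ===== PORT B =====
-- ray & (blocked ^ (blocked - 1)): keep ray bits up to and including the lowest blocker bit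
def towardLow (ray blocked : Int) : Int :=
  PySem.Int.band ray (PySem.Int.bxor blocked (blocked - 1))

-- ray & (-1 << max(blocked.bit_length() - 1, 0)): keep ray bits from the highest blocker bit
-- upward (Python's max(… - 1, 0) is Nat subtraction's clamp; bitLength is Python's bit_length)
def towardHigh (ray blocked : Int) : Int :=
  PySem.Int.band ray ((-1 : Int) <<< (PySem.Int.bitLength blocked - 1))

def compute_rook_attacks_alt (square : Int) (blockers : Int) : Int :=
  let file := PySem.Int.mod square 8
  let col := (72340172838076673 : Int) <<< file.toNat
  let row := (255 : Int) <<< (square - file).toNat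
  let above := -((1 : Int) <<< (square + 1).toNat)
  let below := ((1 : Int) <<< square.toNat) - 1
  let north := PySem.Int.band col above
  let east := PySem.Int.band row above
  let south := PySem.Int.band col below
  let west := PySem.Int.band row below
  PySem.Int.bor (PySem.Int.bor (PySem.Int.bor
    (towardLow north (PySem.Int.band blockers north))
    (towardLow east (PySem.Int.band blockers east)))
    (towardHigh south (PySem.Int.band blockers south)))
    (towardHigh west (PySem.Int.band blockers west))

-- ===== PRECONDITION & SPEC =====
-- Pre_ admits exactly the 64 chessboard squares. For square < 0 Python A raises
-- ValueError (negative shift count). For square ≥ 64 A returns, but the value walks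
-- phantom ranks above the 8×8 board (an artefact outside the function's chess purpose)
-- which B's fixed 8×8 ray masks deliberately do not reproduce.
def Pre_compute_rook_attacks (square : Int) (blockers : Int) : Prop :=
  0 ≤ square ∧ square < 64

instance (square : Int) (blockers : Int) : Decidable (Pre_compute_rook_attacks square blockers) := by
  unfold Pre_compute_rook_attacks; infer_instance

def pvWitness_compute_rook_attacks : Int × Int := (27, 1024)

def Spec_compute_rook_attacks (square : Int) (blockers : Int) (out : Int) : Prop :=
  out = compute_rook_attacks_alt square blockers

instance (square : Int) (blockers : Int) (out : Int) : Decidable (Spec_compute_rook_attacks square blockers out) := by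
  unfold Spec_compute_rook_attacks; infer_instance

-- ===== CLAIM (what is proved, stated in full; the proofs are below) =====
def Claim_equal_compute_rook_attacks : Prop :=
  ∀ (square : Int) (blockers : Int), Dom_compute_rook_attacks square blockers →
    Pre_compute_rook_attacks square blockers →
    Spec_compute_rook_attacks square blockers (compute_rook_attacks square blockers)

-- ===== LEMMAS AND PROOFS =====

-- two's-complement test bit (ofNat: the bit; negSucc: complement of the bit)
def pvTb : Int → Nat → Bool
  | .ofNat m, k => m.testBit k
  | .negSucc m, k => !(m.testBit k)

-- OR of the bits at the given positions
def pvRayN : List Nat → Nat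
  | [] => 0
  | p :: r => 2 ^ p ||| pvRayN r

-- Nat-valued model of pvLoopA over Nat bit positions
def pvLoopN (b : Int) : List Nat → Nat → Nat
  | [], acc => acc
  | p :: r, acc =>
    let acc' := acc ||| 2 ^ p
    if PySem.Int.band b ((2 ^ p : Nat) : Int) ≠ 0 then acc' else pvLoopN b r acc'

-- the four ray position lists of square s (Nat side)
def pvNpos (s : Nat) : List Nat := ((List.range 8).filter (fun r => decide (s / 8 < r))).map (fun r => r * 8 + s % 8)
def pvSpos (s : Nat) : List Nat := (((List.range 8).filter (fun r => decide (r < s / 8))).reverse).map (fun r => r * 8 + s % 8)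
def pvEpos (s : Nat) : List Nat := ((List.range 8).filter (fun f => decide (s % 8 < f))).map (fun f => (s / 8) * 8 + f)
def pvWpos (s : Nat) : List Nat := (((List.range 8).filter (fun f => decide (f < s % 8))).reverse).map (fun f => (s / 8) * 8 + f)

lemma pv_and_mod_two (m n : Nat) : (m &&& n) % 2 = m % 2 * (n % 2) := by
  have h := Nat.testBit_and m n 0
  simp only [Nat.testBit_zero] at h
  rcases Nat.mod_two_eq_zero_or_one m with hm|hm <;> rcases Nat.mod_two_eq_zero_or_one n with hn|hn <;>
    rcases Nat.mod_two_eq_zero_or_one (m &&& n) with ha|ha <;>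
    rw [hm, hn, ha] at h ⊢ <;> simp_all

lemma pv_sub_and_testBit (k : Nat) : ∀ m n : Nat, (m - (m &&& n)).testBit k = (m.testBit k && !(n.testBit k)) := by
  induction k with
  | zero =>
    intro m n
    have hle : m &&& n ≤ m := Nat.and_le_left
    have hand := pv_and_mod_two m n
    simp only [Nat.testBit_zero]
    have key : (m - (m &&& n)) % 2 = 1 ↔ (m % 2 = 1 ∧ ¬ (n % 2 = 1)) := by
      rcases Nat.mod_two_eq_zero_or_one m with hm|hm <;> rcases Nat.mod_two_eq_zero_or_one n with hn|hn <;>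
        rw [hm, hn] at hand <;> constructor <;> intro hh <;> omega
    by_cases hm : m % 2 = 1 <;> by_cases hn : n % 2 = 1 <;> simp [hm, hn, key]
  | succ k ih =>
    intro m n
    have hle : m &&& n ≤ m := Nat.and_le_left
    have hand := pv_and_mod_two m n
    have h2 : (m &&& n) % 2 ≤ m % 2 := by
      rcases Nat.mod_two_eq_zero_or_one m with hm|hm <;> rcases Nat.mod_two_eq_zero_or_one n with hn|hn <;>
        rw [hm, hn] at hand <;> omega
    have hdiv : (m - (m &&& n)) / 2 = m / 2 - (m / 2 &&& n / 2) := by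
      rw [← Nat.and_div_two]; omega
    rw [Nat.testBit_add_one, Nat.testBit_add_one, Nat.testBit_add_one, hdiv]
    exact ih (m / 2) (n / 2)

lemma pv_lowbit_exists {n : Nat} (hn : n ≠ 0) : ∃ p, n.testBit p = true ∧ ∀ q < p, n.testBit q = false := by
  have hex : ∃ i, n.testBit i = true := Nat.exists_testBit_of_ne_zero hn
  refine ⟨Nat.find hex, Nat.find_spec hex, fun q hq => ?_⟩
  have := Nat.find_min hex hq
  simpa using this

lemma pv_pred_testBit {n p : Nat} (hb : n.testBit p = true) (hl : ∀ q < p, n.testBit q = false) :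
    ∀ i, (n - 1).testBit i = (if i < p then true else if i = p then false else n.testBit i) := by
  have h2p : 0 < 2 ^ p := Nat.two_pow_pos p
  have hge : 2 ^ p ≤ n := Nat.ge_two_pow_of_testBit hb
  have hmod : n % 2 ^ p = 0 := by
    rw [← Nat.and_two_pow_sub_one_eq_mod]
    apply Nat.eq_of_testBit_eq; intro i
    rw [Nat.testBit_and, Nat.testBit_two_pow_sub_one, Nat.zero_testBit]
    by_cases hip : i < p
    · simp [hl i hip]
    · simp [hip]
  have hdvd : 2 ^ p ∣ n := Nat.dvd_of_mod_eq_zero hmod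
  have hn_eq : 2 ^ p * (n / 2 ^ p) = n := Nat.mul_div_cancel' hdvd
  set m := n / 2 ^ p with hm
  have hm0 : m.testBit 0 = true := by
    rw [hm, Nat.testBit_div_two_pow]; simpa using hb
  have hmodd : m % 2 = 1 := by simpa [Nat.testBit_zero] using hm0
  have hm1 : 1 ≤ m := by
    rcases Nat.eq_zero_or_pos m with h0 | h1
    · rw [h0, Nat.mul_zero] at hn_eq; omega
    · exact h1
  have hmul : 2 ^ p * m = 2 ^ p * (m - 1) + 2 ^ p := by
    conv_lhs => rw [show m = (m - 1) + 1 from by omega]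
    rw [Nat.mul_add, Nat.mul_one]
  have hsub : n - 1 = 2 ^ p * (m - 1) + (2 ^ p - 1) := by omega
  intro i
  rw [hsub, Nat.testBit_two_pow_mul_add (m - 1) (by omega) i]
  by_cases hip : i < p
  · simp [hip, Nat.testBit_two_pow_sub_one]
  · by_cases hip2 : i = p
    · subst hip2
      rw [Nat.sub_self, Nat.testBit_zero]
      have hm2 : (m - 1) % 2 = 0 := by omega
      simp [hm2]
    · have hgt : p < i := by omega
      simp only [if_neg hip, if_neg hip2]
      have hnb : n.testBit i = m.testBit (i - p) := by
        conv_rhs => rw [show m.testBit (i - p) = (decide (p ≤ i) && m.testBit (i - p)) from by simp [Nat.le_of_lt hgt]]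
        rw [← Nat.testBit_mul_two_pow, Nat.mul_comm, hn_eq]
      rw [hnb]
      obtain ⟨j, hj⟩ : ∃ j, i - p = j + 1 := ⟨i - p - 1, by omega⟩
      rw [hj, Nat.testBit_add_one, Nat.testBit_add_one, show (m - 1) / 2 = m / 2 from by omega]

lemma pv_xor_pred {n p : Nat} (hb : n.testBit p = true) (hl : ∀ q < p, n.testBit q = false) :
    n ^^^ (n - 1) = 2 ^ (p + 1) - 1 := by
  apply Nat.eq_of_testBit_eq; intro i
  rw [Nat.testBit_xor, pv_pred_testBit hb hl i, Nat.testBit_two_pow_sub_one]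
  by_cases hip : i < p
  · simp [hip, hl i hip]; omega
  · by_cases hip2 : i = p
    · subst hip2; simp [hb]
    · simp [hip, hip2]; omega

lemma pv_log2_eq {n p : Nat} (hb : n.testBit p = true) (hh : ∀ q, p < q → n.testBit q = false) :
    n.log2 = p := by
  have hge : 2 ^ p ≤ n := Nat.ge_two_pow_of_testBit hb
  have hn0 : n ≠ 0 := by
    intro h; subst h; simp [Nat.zero_testBit] at hb
  have hlt : n < 2 ^ (p + 1) := Nat.lt_pow_two_of_testBit n (fun i hi => hh i (by omega))
  have h1 : p ≤ n.log2 := (Nat.le_log2 hn0).mpr hge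
  have h2 : n.log2 < p + 1 := (Nat.log2_lt hn0).mpr hlt
  omega

lemma pv_bitLength_cast (n : Nat) (hn : n ≠ 0) : PySem.Int.bitLength (n : Int) = n.log2 + 1 := by
  have h1 := PySem.Int.two_pow_bitLength_le (n : Int) (by exact_mod_cast hn)
  have h2 := PySem.Int.lt_two_pow_bitLength (n : Int)
  rw [Int.natAbs_natCast] at h1 h2
  have hbl1 : 1 ≤ PySem.Int.bitLength (n : Int) := by
    by_contra h
    have : PySem.Int.bitLength (n : Int) = 0 := by omega
    rw [this] at h2; simp at h2; omega
  have ha : PySem.Int.bitLength (n : Int) - 1 ≤ n.log2 := (Nat.le_log2 hn).mpr h1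
  have hbx : n.log2 < PySem.Int.bitLength (n : Int) := (Nat.log2_lt hn).mpr h2
  omega

lemma pv_band_natCast_negSucc (r m : Nat) :
    PySem.Int.band (r : Int) (Int.negSucc m) = ((r - (r &&& m) : Nat) : Int) := by
  unfold PySem.Int.band
  rw [if_pos (Int.natCast_nonneg r), if_neg (by omega : ¬ (0 : Int) ≤ Int.negSucc m),
      show -Int.negSucc m - 1 = (m : Int) from by rw [Int.negSucc_eq]; ring,
      Int.toNat_natCast, Int.toNat_natCast]

lemma pv_band_cast_right (b : Int) (r : Nat) :
    PySem.Int.band b (r : Int) = (((PySem.Int.band b (r : Int)).toNat : Nat) : Int) ∧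
    ∀ k, (PySem.Int.band b (r : Int)).toNat.testBit k = (pvTb b k && r.testBit k) := by
  cases b with
  | ofNat m =>
    rw [show Int.ofNat m = (m : Int) from rfl, PySem.Int.band_natCast, Int.toNat_natCast]
    exact ⟨rfl, fun k => by rw [Nat.testBit_and]; rfl⟩
  | negSucc m =>
    rw [PySem.Int.band_comm, pv_band_natCast_negSucc, Int.toNat_natCast]
    refine ⟨rfl, fun k => ?_⟩
    rw [pv_sub_and_testBit k r m]
    show _ = ((!m.testBit k) && r.testBit k)
    rw [Bool.and_comm]

lemma pv_band_pow_ne_iff (b : Int) (p : Nat) :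
    (PySem.Int.band b ((2 ^ p : Nat) : Int) ≠ 0) ↔ pvTb b p = true := by
  obtain ⟨hcast, hbits⟩ := pv_band_cast_right b (2 ^ p)
  constructor
  · intro h
    have hv : (PySem.Int.band b ((2 ^ p : Nat) : Int)).toNat ≠ 0 := by
      intro h0; rw [hcast, h0] at h; simp at h
    obtain ⟨i, hi⟩ := Nat.exists_testBit_of_ne_zero hv
    rw [hbits i, Nat.testBit_two_pow] at hi
    obtain ⟨h1, h2⟩ : pvTb b i = true ∧ p = i := by simpa using hi
    subst h2; exact h1
  · intro h
    have hv : (PySem.Int.band b ((2 ^ p : Nat) : Int)).toNat.testBit p = true := by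
      rw [hbits p, h, Nat.testBit_two_pow]; simp
    intro h0
    rw [h0] at hcast
    have : (PySem.Int.band b ((2 ^ p : Nat) : Int)).toNat = 0 := by
      rw [h0]; rfl
    rw [this, Nat.zero_testBit] at hv; exact Bool.false_ne_true hv

lemma pv_ray_testBit (ps : List Nat) (q : Nat) : (pvRayN ps).testBit q = decide (q ∈ ps) := by
  induction ps with
  | nil => simp [pvRayN, Nat.zero_testBit]
  | cons p rest ih =>
    rw [pvRayN, Nat.testBit_or, ih, Nat.testBit_two_pow]
    by_cases h2 : q ∈ rest
    · simp [List.mem_cons, h2]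
    · by_cases h : p = q
      · subst h; simp [List.mem_cons]
      · simp [List.mem_cons, h2, h, show ¬ q = p from fun hh => h hh.symm]

lemma pv_loopN_acc (b : Int) (ps : List Nat) (a : Nat) : pvLoopN b ps a = a ||| pvLoopN b ps 0 := by
  induction ps generalizing a with
  | nil => simp [pvLoopN, Nat.or_zero]
  | cons p rest ih =>
    simp only [pvLoopN]
    by_cases h : PySem.Int.band b ((2 ^ p : Nat) : Int) ≠ 0
    · rw [if_pos h, if_pos h, Nat.zero_or]
    · rw [if_neg h, if_neg h, Nat.zero_or]
      rw [ih (a ||| 2 ^ p), ih (2 ^ p), Nat.or_assoc]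

lemma pv_towardLow_zero (r : Nat) : towardLow (r : Int) 0 = (r : Int) := by
  unfold towardLow
  rw [show PySem.Int.bxor 0 (0 - 1) = -1 from by decide, PySem.Int.band_neg_one]

lemma pv_towardLow_pos (r n p : Nat) (hb : n.testBit p = true) (hl : ∀ q < p, n.testBit q = false) :
    towardLow (r : Int) (n : Int) = ((r &&& (2 ^ (p + 1) - 1) : Nat) : Int) := by
  have hn0 : n ≠ 0 := by
    intro h; subst h; simp [Nat.zero_testBit] at hb
  unfold towardLow
  rw [show ((n : Int) - 1) = ((n - 1 : Nat) : Int) from by omega,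
      PySem.Int.bxor_natCast, pv_xor_pred hb hl, PySem.Int.band_natCast]

lemma pv_towardHigh_zero (r : Nat) : towardHigh (r : Int) 0 = (r : Int) := by
  unfold towardHigh
  rw [show ((-1 : Int) <<< (PySem.Int.bitLength 0 - 1)) = -1 from by decide, PySem.Int.band_neg_one]

lemma pv_towardHigh_pos (r n : Nat) (hn : n ≠ 0) :
    towardHigh (r : Int) (n : Int) = ((r - (r &&& (2 ^ n.log2 - 1)) : Nat) : Int) := by
  unfold towardHigh
  rw [pv_bitLength_cast n hn, Nat.add_sub_cancel]
  have h2p : 0 < 2 ^ n.log2 := Nat.two_pow_pos n.log2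
  have hneg : ((-1 : Int) <<< n.log2) = Int.negSucc (2 ^ n.log2 - 1) := by
    rw [Int.shiftLeft_eq, Int.negSucc_eq]
    have : ((2 ^ n.log2 - 1 : Nat) : Int) = (2 ^ n.log2 : Nat) - 1 := by omega
    rw [this]; push_cast; ring
  rw [hneg, pv_band_natCast_negSucc]

lemma pv_dirAsc (b : Int) (ps : List Nat) (hs : ps.Pairwise (· < ·)) :
    ((pvLoopN b ps 0 : Nat) : Int) = towardLow (pvRayN ps : Int) (PySem.Int.band b (pvRayN ps : Int)) := by
  induction ps with
  | nil =>
    show ((pvLoopN b [] 0 : Nat) : Int) = towardLow ((pvRayN [] : Nat) : Int) _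
    rw [show pvRayN [] = 0 from rfl, show pvLoopN b [] 0 = 0 from rfl]
    rw [Nat.cast_zero, PySem.Int.band_zero]
    simpa using pv_towardLow_zero 0
  | cons p rest ih =>
    obtain ⟨hcast, hbits⟩ := pv_band_cast_right b (pvRayN (p :: rest))
    have hmem : ∀ q ∈ rest, p < q := (List.pairwise_cons.mp hs).1
    have hs' := (List.pairwise_cons.mp hs).2
    rw [show pvLoopN b (p :: rest) 0 =
        (if PySem.Int.band b ((2 ^ p : Nat) : Int) ≠ 0 then 0 ||| 2 ^ p
         else pvLoopN b rest (0 ||| 2 ^ p)) from rfl, Nat.zero_or]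
    by_cases hb : pvTb b p = true
    · rw [if_pos ((pv_band_pow_ne_iff b p).mpr hb)]
      rw [hcast]
      have hvp : (PySem.Int.band b ((pvRayN (p :: rest) : Nat) : Int)).toNat.testBit p = true := by
        rw [hbits, pv_ray_testBit, hb]; simp
      have hvl : ∀ q < p, (PySem.Int.band b ((pvRayN (p :: rest) : Nat) : Int)).toNat.testBit q = false := by
        intro q hq
        rw [hbits, pv_ray_testBit]
        have hno : ¬ q ∈ p :: rest := by
          simp only [List.mem_cons]
          push_neg
          exact ⟨by omega, fun hqr => by have := hmem q hqr; omega⟩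
        simp [hno]
      rw [pv_towardLow_pos _ _ p hvp hvl, Int.natCast_inj]
      apply Nat.eq_of_testBit_eq; intro q
      rw [Nat.testBit_and, pv_ray_testBit, Nat.testBit_two_pow_sub_one, Nat.testBit_two_pow]
      by_cases hqp : q = p
      · subst hqp; simp [List.mem_cons]
      · by_cases hqr : q ∈ rest
        · have := hmem q hqr
          simp [List.mem_cons, hqp, hqr, show ¬ (q < p + 1) from by omega, show p ≠ q from fun h => hqp h.symm]
        · simp [List.mem_cons, hqp, hqr, show p ≠ q from fun h => hqp h.symm]
    · rw [if_neg (fun hcc => hb ((pv_band_pow_ne_iff b p).mp hcc))]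
      have hbf : pvTb b p = false := by simpa using hb
      rw [pv_loopN_acc b rest (2 ^ p)]
      obtain ⟨hc2, hb2⟩ := pv_band_cast_right b (pvRayN rest)
      have hcoll : PySem.Int.band b ((pvRayN (p :: rest) : Nat) : Int)
          = PySem.Int.band b ((pvRayN rest : Nat) : Int) := by
        rw [hcast, hc2, Int.natCast_inj]
        apply Nat.eq_of_testBit_eq; intro q
        rw [hbits, hb2, pv_ray_testBit, pv_ray_testBit]
        by_cases hqp : q = p
        · subst hqp
          rw [hbf]
          simp
        · simp [List.mem_cons, hqp]
      rw [hcoll, hc2]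
      have ih' := ih hs'
      rw [hc2] at ih'
      by_cases hw : (PySem.Int.band b ((pvRayN rest : Nat) : Int)).toNat = 0
      · rw [hw, Nat.cast_zero, pv_towardLow_zero] at ih'
        rw [hw, Nat.cast_zero]
        have hray : pvRayN (p :: rest) = 2 ^ p ||| pvRayN rest := rfl
        rw [show towardLow ((pvRayN (p :: rest) : Nat) : Int) 0 = ((pvRayN (p :: rest) : Nat) : Int) from
              pv_towardLow_zero _, hray, Int.natCast_inj]
        have : pvLoopN b rest 0 = pvRayN rest := by exact_mod_cast ih'
        rw [this]
      · obtain ⟨l, hl1, hl2⟩ := pv_lowbit_exists hw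
        have hlrest : l ∈ rest := by
          have h := hl1
          rw [hb2, pv_ray_testBit] at h
          have h2 : pvTb b l = true ∧ l ∈ rest := by simpa using h
          exact h2.2
        have hlp : p < l := hmem l hlrest
        rw [pv_towardLow_pos _ _ l hl1 hl2] at ih'
        rw [pv_towardLow_pos _ _ l hl1 hl2, Int.natCast_inj]
        have ihn : pvLoopN b rest 0 = pvRayN rest &&& (2 ^ (l + 1) - 1) := by exact_mod_cast ih'
        rw [ihn]
        apply Nat.eq_of_testBit_eq; intro q
        rw [show pvRayN (p :: rest) = 2 ^ p ||| pvRayN rest from rfl]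
        rw [Nat.testBit_or, Nat.testBit_and, Nat.testBit_and, Nat.testBit_or,
            Nat.testBit_two_pow, Nat.testBit_two_pow_sub_one]
        by_cases hqp : q = p
        · subst hqp; simp [show q < l + 1 from by omega]
        · simp [show p ≠ q from fun h => hqp h.symm]

lemma pv_dirDesc (b : Int) (ps : List Nat) (hs : ps.Pairwise (· > ·)) :
    ((pvLoopN b ps 0 : Nat) : Int) = towardHigh (pvRayN ps : Int) (PySem.Int.band b (pvRayN ps : Int)) := by
  induction ps with
  | nil =>
    rw [show pvRayN [] = 0 from rfl, show pvLoopN b [] 0 = 0 from rfl]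
    rw [Nat.cast_zero, PySem.Int.band_zero]
    simpa using pv_towardHigh_zero 0
  | cons p rest ih =>
    obtain ⟨hcast, hbits⟩ := pv_band_cast_right b (pvRayN (p :: rest))
    have hmem : ∀ q ∈ rest, q < p := (List.pairwise_cons.mp hs).1
    have hs' := (List.pairwise_cons.mp hs).2
    rw [show pvLoopN b (p :: rest) 0 =
        (if PySem.Int.band b ((2 ^ p : Nat) : Int) ≠ 0 then 0 ||| 2 ^ p
         else pvLoopN b rest (0 ||| 2 ^ p)) from rfl, Nat.zero_or]
    by_cases hb : pvTb b p = true
    · rw [if_pos ((pv_band_pow_ne_iff b p).mpr hb)]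
      rw [hcast]
      set v := (PySem.Int.band b ((pvRayN (p :: rest) : Nat) : Int)).toNat with hv
      have hvp : v.testBit p = true := by
        rw [hv, hbits, pv_ray_testBit, hb]; simp
      have hvh : ∀ q, p < q → v.testBit q = false := by
        intro q hq
        rw [hv, hbits, pv_ray_testBit]
        have hno : ¬ q ∈ p :: rest := by
          simp only [List.mem_cons]
          push_neg
          exact ⟨by omega, fun hqr => by have := hmem q hqr; omega⟩
        simp [hno]
      have hv0 : v ≠ 0 := by
        intro h0; rw [h0, Nat.zero_testBit] at hvp; exact Bool.false_ne_true hvp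
      rw [pv_towardHigh_pos _ _ hv0, pv_log2_eq hvp hvh, Int.natCast_inj]
      apply Nat.eq_of_testBit_eq; intro q
      rw [pv_sub_and_testBit, pv_ray_testBit,
          Nat.testBit_two_pow_sub_one, Nat.testBit_two_pow]
      by_cases hqp : q = p
      · subst hqp; simp [List.mem_cons]
      · by_cases hqr : q ∈ rest
        · have := hmem q hqr
          simp [List.mem_cons, hqp, hqr, show q < p from by omega, show p ≠ q from fun h => hqp h.symm]
        · simp [List.mem_cons, hqp, hqr, show p ≠ q from fun h => hqp h.symm]
    · rw [if_neg (fun hcc => hb ((pv_band_pow_ne_iff b p).mp hcc))]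
      have hbf : pvTb b p = false := by simpa using hb
      rw [pv_loopN_acc b rest (2 ^ p)]
      obtain ⟨hc2, hb2⟩ := pv_band_cast_right b (pvRayN rest)
      have hcoll : PySem.Int.band b ((pvRayN (p :: rest) : Nat) : Int)
          = PySem.Int.band b ((pvRayN rest : Nat) : Int) := by
        rw [hcast, hc2, Int.natCast_inj]
        apply Nat.eq_of_testBit_eq; intro q
        rw [hbits, hb2, pv_ray_testBit, pv_ray_testBit]
        by_cases hqp : q = p
        · subst hqp; rw [hbf]; simp
        · simp [List.mem_cons, hqp]
      rw [hcoll, hc2]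
      have ih' := ih hs'
      rw [hc2] at ih'
      set w := (PySem.Int.band b ((pvRayN rest : Nat) : Int)).toNat with hwdef
      by_cases hw : w = 0
      · rw [hw, Nat.cast_zero, pv_towardHigh_zero] at ih'
        rw [hw, Nat.cast_zero]
        rw [show towardHigh ((pvRayN (p :: rest) : Nat) : Int) 0 = ((pvRayN (p :: rest) : Nat) : Int) from
              pv_towardHigh_zero _, show pvRayN (p :: rest) = 2 ^ p ||| pvRayN rest from rfl, Int.natCast_inj]
        have : pvLoopN b rest 0 = pvRayN rest := by exact_mod_cast ih'
        rw [this]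
      · have hwlt : w < 2 ^ p := by
          apply Nat.lt_pow_two_of_testBit
          intro i hi
          rw [hwdef, hb2, pv_ray_testBit]
          have hno : ¬ i ∈ rest := fun hir => by have := hmem i hir; omega
          simp [hno]
        have hllt : w.log2 < p := (Nat.log2_lt hw).mpr hwlt
        rw [pv_towardHigh_pos _ _ hw] at ih'
        rw [pv_towardHigh_pos _ _ hw, Int.natCast_inj]
        have ihn : pvLoopN b rest 0 = pvRayN rest - (pvRayN rest &&& (2 ^ w.log2 - 1)) := by exact_mod_cast ih'
        rw [ihn]
        apply Nat.eq_of_testBit_eq; intro q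
        rw [Nat.testBit_or, pv_sub_and_testBit, pv_sub_and_testBit,
            show pvRayN (p :: rest) = 2 ^ p ||| pvRayN rest from rfl, Nat.testBit_or,
            Nat.testBit_two_pow_sub_one, Nat.testBit_two_pow]
        by_cases hqp : q = p
        · subst hqp; simp [show ¬ (q < w.log2) from by omega]
        · simp [show p ≠ q from fun h => hqp h.symm]

lemma pv_bridge (b : Int) (ps : List Nat) (a : Nat) :
    pvLoopA b (ps.map (fun p : Nat => (p : Int))) (a : Int) = ((pvLoopN b ps a : Nat) : Int) := by
  induction ps generalizing a with
  | nil => simp [pvLoopA, pvLoopN]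
  | cons p rest ih =>
    simp only [List.map_cons, pvLoopA, pvLoopN]
    rw [show (((1 <<< ((p : Int)).toNat : Nat)) : Int) = ((2 ^ p : Nat) : Int) from by
          rw [Int.toNat_natCast, Nat.one_shiftLeft],
        PySem.Int.bor_natCast]
    by_cases h : PySem.Int.band b ((2 ^ p : Nat) : Int) ≠ 0
    · rw [if_pos h, if_pos h]
    · rw [if_neg h, if_neg h]
      exact ih (a ||| 2 ^ p)

lemma pv_bridge0 (b : Int) (ps : List Nat) :
    pvLoopA b (ps.map (fun p : Nat => (p : Int))) 0 = ((pvLoopN b ps 0 : Nat) : Int) := by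
  simpa using pv_bridge b ps 0

-- the per-square facts, decided over the 64 board squares
lemma pvF1 (s : Nat) (hs : s < 64) :
    (PySem.List.pyRange (PySem.Int.floordiv (s : Int) 8 + 1) 8 1).map (fun r => r * 8 + PySem.Int.mod (s : Int) 8)
      = (pvNpos s).map (fun p : Nat => (p : Int)) := by
  have h : ∀ t : Fin 64, (PySem.List.pyRange (PySem.Int.floordiv (t.val : Int) 8 + 1) 8 1).map
      (fun r => r * 8 + PySem.Int.mod (t.val : Int) 8) = (pvNpos t.val).map (fun p : Nat => (p : Int)) := by decide
  exact h ⟨s, hs⟩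

lemma pvF2 (s : Nat) (hs : s < 64) :
    (PySem.List.pyRange (PySem.Int.floordiv (s : Int) 8 - 1) (-1) (-1)).map (fun r => r * 8 + PySem.Int.mod (s : Int) 8)
      = (pvSpos s).map (fun p : Nat => (p : Int)) := by
  have h : ∀ t : Fin 64, (PySem.List.pyRange (PySem.Int.floordiv (t.val : Int) 8 - 1) (-1) (-1)).map
      (fun r => r * 8 + PySem.Int.mod (t.val : Int) 8) = (pvSpos t.val).map (fun p : Nat => (p : Int)) := by decide
  exact h ⟨s, hs⟩

lemma pvF3 (s : Nat) (hs : s < 64) :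
    (PySem.List.pyRange (PySem.Int.mod (s : Int) 8 + 1) 8 1).map (fun f => PySem.Int.floordiv (s : Int) 8 * 8 + f)
      = (pvEpos s).map (fun p : Nat => (p : Int)) := by
  have h : ∀ t : Fin 64, (PySem.List.pyRange (PySem.Int.mod (t.val : Int) 8 + 1) 8 1).map
      (fun f => PySem.Int.floordiv (t.val : Int) 8 * 8 + f) = (pvEpos t.val).map (fun p : Nat => (p : Int)) := by decide
  exact h ⟨s, hs⟩

lemma pvF4 (s : Nat) (hs : s < 64) :
    (PySem.List.pyRange (PySem.Int.mod (s : Int) 8 - 1) (-1) (-1)).map (fun f => PySem.Int.floordiv (s : Int) 8 * 8 + f)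
      = (pvWpos s).map (fun p : Nat => (p : Int)) := by
  have h : ∀ t : Fin 64, (PySem.List.pyRange (PySem.Int.mod (t.val : Int) 8 - 1) (-1) (-1)).map
      (fun f => PySem.Int.floordiv (t.val : Int) 8 * 8 + f) = (pvWpos t.val).map (fun p : Nat => (p : Int)) := by decide
  exact h ⟨s, hs⟩

lemma pvF5 (s : Nat) (hs : s < 64) :
    PySem.Int.band ((72340172838076673 : Int) <<< (PySem.Int.mod (s : Int) 8).toNat)
      (-((1 : Int) <<< ((s : Int) + 1).toNat)) = ((pvRayN (pvNpos s) : Nat) : Int) := by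
  have h : ∀ t : Fin 64, PySem.Int.band ((72340172838076673 : Int) <<< (PySem.Int.mod (t.val : Int) 8).toNat)
      (-((1 : Int) <<< ((t.val : Int) + 1).toNat)) = ((pvRayN (pvNpos t.val) : Nat) : Int) := by decide
  exact h ⟨s, hs⟩

lemma pvF6 (s : Nat) (hs : s < 64) :
    PySem.Int.band ((72340172838076673 : Int) <<< (PySem.Int.mod (s : Int) 8).toNat)
      (((1 : Int) <<< (s : Int).toNat) - 1) = ((pvRayN (pvSpos s) : Nat) : Int) := by
  have h : ∀ t : Fin 64, PySem.Int.band ((72340172838076673 : Int) <<< (PySem.Int.mod (t.val : Int) 8).toNat)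
      (((1 : Int) <<< (t.val : Int).toNat) - 1) = ((pvRayN (pvSpos t.val) : Nat) : Int) := by decide
  exact h ⟨s, hs⟩

lemma pvF7 (s : Nat) (hs : s < 64) :
    PySem.Int.band ((255 : Int) <<< ((s : Int) - PySem.Int.mod (s : Int) 8).toNat)
      (-((1 : Int) <<< ((s : Int) + 1).toNat)) = ((pvRayN (pvEpos s) : Nat) : Int) := by
  have h : ∀ t : Fin 64, PySem.Int.band ((255 : Int) <<< ((t.val : Int) - PySem.Int.mod (t.val : Int) 8).toNat)
      (-((1 : Int) <<< ((t.val : Int) + 1).toNat)) = ((pvRayN (pvEpos t.val) : Nat) : Int) := by decide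
  exact h ⟨s, hs⟩

lemma pvF8 (s : Nat) (hs : s < 64) :
    PySem.Int.band ((255 : Int) <<< ((s : Int) - PySem.Int.mod (s : Int) 8).toNat)
      (((1 : Int) <<< (s : Int).toNat) - 1) = ((pvRayN (pvWpos s) : Nat) : Int) := by
  have h : ∀ t : Fin 64, PySem.Int.band ((255 : Int) <<< ((t.val : Int) - PySem.Int.mod (t.val : Int) 8).toNat)
      (((1 : Int) <<< (t.val : Int).toNat) - 1) = ((pvRayN (pvWpos t.val) : Nat) : Int) := by decide
  exact h ⟨s, hs⟩

lemma pvSortN (s : Nat) (hs : s < 64) : (pvNpos s).Pairwise (· < ·) := by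
  have h : ∀ t : Fin 64, (pvNpos t.val).Pairwise (· < ·) := by decide
  exact h ⟨s, hs⟩
lemma pvSortS (s : Nat) (hs : s < 64) : (pvSpos s).Pairwise (· > ·) := by
  have h : ∀ t : Fin 64, (pvSpos t.val).Pairwise (· > ·) := by decide
  exact h ⟨s, hs⟩
lemma pvSortE (s : Nat) (hs : s < 64) : (pvEpos s).Pairwise (· < ·) := by
  have h : ∀ t : Fin 64, (pvEpos t.val).Pairwise (· < ·) := by decide
  exact h ⟨s, hs⟩
lemma pvSortW (s : Nat) (hs : s < 64) : (pvWpos s).Pairwise (· > ·) := by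
  have h : ∀ t : Fin 64, (pvWpos t.val).Pairwise (· > ·) := by decide
  exact h ⟨s, hs⟩

-- ===== VERDICT (by name: the statement is the Claim_ definition above) =====
theorem compute_rook_attacks_spec : Claim_equal_compute_rook_attacks := by
  intro square blockers _hdom hpre
  unfold Spec_compute_rook_attacks
  obtain ⟨h0, h64⟩ := hpre
  obtain ⟨s, hs, rfl⟩ : ∃ s : Nat, s < 64 ∧ square = (s : Int) :=
    ⟨square.toNat, by omega, (Int.toNat_of_nonneg h0).symm⟩
  have hA : compute_rook_attacks (s : Int) blockers =
      ((pvLoopN blockers (pvWpos s) (pvLoopN blockers (pvEpos s)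
        (pvLoopN blockers (pvSpos s) (pvLoopN blockers (pvNpos s) 0))) : Nat) : Int) := by
    dsimp only [compute_rook_attacks]
    rw [pvF1 s hs, pvF2 s hs, pvF3 s hs, pvF4 s hs,
        pv_bridge0, pv_bridge, pv_bridge, pv_bridge]
  have hB : compute_rook_attacks_alt (s : Int) blockers =
      PySem.Int.bor (PySem.Int.bor (PySem.Int.bor
        (towardLow ((pvRayN (pvNpos s) : Nat) : Int) (PySem.Int.band blockers ((pvRayN (pvNpos s) : Nat) : Int)))
        (towardLow ((pvRayN (pvEpos s) : Nat) : Int) (PySem.Int.band blockers ((pvRayN (pvEpos s) : Nat) : Int))))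
        (towardHigh ((pvRayN (pvSpos s) : Nat) : Int) (PySem.Int.band blockers ((pvRayN (pvSpos s) : Nat) : Int))))
        (towardHigh ((pvRayN (pvWpos s) : Nat) : Int) (PySem.Int.band blockers ((pvRayN (pvWpos s) : Nat) : Int))) := by
    dsimp only [compute_rook_attacks_alt]
    rw [pvF5 s hs, pvF6 s hs, pvF7 s hs, pvF8 s hs]
  rw [hA, hB, ← pv_dirAsc blockers (pvNpos s) (pvSortN s hs),
      ← pv_dirAsc blockers (pvEpos s) (pvSortE s hs),
      ← pv_dirDesc blockers (pvSpos s) (pvSortS s hs),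
      ← pv_dirDesc blockers (pvWpos s) (pvSortW s hs)]
  rw [pv_loopN_acc blockers (pvWpos s)
        (pvLoopN blockers (pvEpos s) (pvLoopN blockers (pvSpos s) (pvLoopN blockers (pvNpos s) 0))),
      pv_loopN_acc blockers (pvEpos s) (pvLoopN blockers (pvSpos s) (pvLoopN blockers (pvNpos s) 0)),
      pv_loopN_acc blockers (pvSpos s) (pvLoopN blockers (pvNpos s) 0)]
  rw [PySem.Int.bor_natCast, PySem.Int.bor_natCast, PySem.Int.bor_natCast]
  rw [Int.natCast_inj]
  ac_rfl
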